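-- pv_equiv track=rewrite | github.com/donghcn/crawler-get-journal | crawler.py | divide_html
-- ===== SOURCE A (Python) =====
-- def divide_html(achar, str):
--
--     str = str.strip()
--     ret = []
--     for ind in range(len(achar)):
--         pos = str.index(achar[ind])
--         ret.append(str[:pos])
--         str = str[pos + 1:]
--     ret.append(str)
--     return ret
-- ===== SOURCE B (Python) =====
-- def divide_html(achar, str):
--     s = str.strip()
--     # pass 1: absolute boundary positions
--     bounds = []
--     start = 0
--     for ch in achar:
--         pos = s.index(ch, start)
--         bounds.append(pos)
--         start = pos + 1
--     # pass 2: slice between consecutive boundaries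
--     ret = []
--     prev = 0
--     for pos in bounds:
--         ret.append(s[prev:pos])
--         prev = pos + 1
--     ret.append(s[prev:])
--     return ret
-- ===== Notes on version B (the rewrite author's own statement) =====
-- stated objective: alternative
-- what changed: B replaces A's single consuming loop (repeatedly re-slicing the string after each match) by two differently-shaped passes: one pass collecting absolute boundary positions via s.index(ch, start), and a second pass slicing the untouched string between consecutive boundaries.
-- outside the precondition, e.g. on divide_html(['', ''], ''): A returns ['', '', ''], B raises ValueError
import Mathlib
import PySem

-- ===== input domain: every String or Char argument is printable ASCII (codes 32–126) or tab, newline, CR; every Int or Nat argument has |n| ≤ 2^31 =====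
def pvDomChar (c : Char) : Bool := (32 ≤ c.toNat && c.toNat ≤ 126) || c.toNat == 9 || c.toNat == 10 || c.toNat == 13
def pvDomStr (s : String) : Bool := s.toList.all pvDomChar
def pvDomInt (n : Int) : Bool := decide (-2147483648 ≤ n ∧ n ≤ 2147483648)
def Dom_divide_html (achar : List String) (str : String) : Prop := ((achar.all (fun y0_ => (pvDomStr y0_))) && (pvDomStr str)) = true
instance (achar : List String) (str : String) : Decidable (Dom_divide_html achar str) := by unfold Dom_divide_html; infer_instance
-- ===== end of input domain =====

-- B separates boundary-finding (s.index(ch, start)) from piece-building into two passes instead of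
-- A's single consuming loop that re-slices the string; objective: alternative decomposition, not speed.


-- ===== PORT A =====
-- A's loop: find the next delimiter in the remaining text, cut the prefix off, consume past it.
-- str.index raising ValueError is the `pos = -1` branch: the port returns [] there; Pre_ excludes it.
def pvDivA : List (List Char) → List Char → List (List Char)
  | [], s => [s]
  | d :: ds, s =>
    let pos := PySem.Chars.find s d
    if pos = -1 then []   -- ValueError in Python; excluded by Pre_
    else PySem.List.slice s none (some pos) ::
         pvDivA ds (PySem.List.slice s (some (pos + 1)) none)

def divide_html (achar : List String) (str : String) : List String :=
  (pvDivA (achar.map String.toList) (PySem.Chars.strip str.toList)).map String.ofList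

-- ===== PORT B =====
-- B pass 1: absolute boundary positions via s.index(ch, start); none = ValueError (excluded by Pre_).
def pvBounds : List (List Char) → List Char → Int → Option (List Int)
  | [], _, _ => some []
  | d :: ds, s, start =>
    let pos := PySem.Chars.findFrom s d start none
    if pos = -1 then none   -- ValueError in Python; excluded by Pre_
    else (pvBounds ds s (pos + 1)).map (pos :: ·)

-- B pass 2: slice between consecutive boundaries, then the tail.
def pvCut (s : List Char) : Int → List Int → List (List Char)
  | prev, [] => [PySem.List.slice s (some prev) none]
  | prev, p :: ps => PySem.List.slice s (some prev) (some p) :: pvCut s (p + 1) ps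

def divide_html_alt (achar : List String) (str : String) : List String :=
  match pvBounds (achar.map String.toList) (PySem.Chars.strip str.toList) 0 with
  | none => []   -- ValueError in Python; excluded by Pre_
  | some bs => (pvCut (PySem.Chars.strip str.toList) 0 bs).map String.ofList

-- ===== PRECONDITION & SPEC =====
-- Sequential-containment check: each delimiter occurs in the stripped text at or after the
-- position one past the previous match (the chain of successful s.index(ch, start) calls).
def pvSeqFound : List (List Char) → List Char → Nat → Bool
  | [], _, _ => true
  | d :: ds, s, start =>
    let pos := PySem.Chars.findFrom s d (start : Int) none
    if pos = -1 then false else pvSeqFound ds s (pos.toNat + 1)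

-- Pre_ admits exactly the inputs on which both programs return: it excludes the inputs where some
-- delimiter is missing (A and B both raise ValueError), and additionally the corner where an
-- empty-string delimiter is searched for past the end of the stripped text — there A still returns
-- (it keeps re-finding '' in the already-exhausted remainder, an artefact of its consume-one-char
-- loop) while B's index(ch, start) raises ValueError.
def Pre_divide_html (achar : List String) (str : String) : Prop :=
  pvSeqFound (achar.map String.toList) (PySem.Chars.strip str.toList) 0 = true
instance (achar : List String) (str : String) : Decidable (Pre_divide_html achar str) := by
  unfold Pre_divide_html; infer_instance

def pvWitness_divide_html : List String × String := ([",", ";"], " a,b;c ")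

def Spec_divide_html (achar : List String) (str : String) (out : List String) : Prop := out = divide_html_alt achar str
instance (achar : List String) (str : String) (out : List String) : Decidable (Spec_divide_html achar str out) := by unfold Spec_divide_html; infer_instance

-- ===== CLAIM (what is proved, stated in full; the proofs are below) =====
def Claim_equal_divide_html : Prop := ∀ (achar : List String) (str : String), Dom_divide_html achar str → Pre_divide_html achar str → Spec_divide_html achar str (divide_html achar str)

-- ===== LEMMAS AND PROOFS =====

-- findFrom with a start past the end of the text is -1 (even for the empty needle).
lemma pvFindFrom_past (s d : List Char) (k : Nat) (h : s.length < k) :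
    PySem.Chars.findFrom s d (k : Int) none = -1 := by
  simp only [PySem.Chars.findFrom]
  have h1 : ¬ ((k : Int) < 0) := by omega
  have h2 : (s.length : Int) < (k : Int) := by exact_mod_cast h
  simp [h1, h2]

-- Main invariant: if the find-chain from absolute offset k succeeds, B's boundary pass succeeds
-- and B's slicing pass from k rebuilds exactly A's consuming loop run on the text dropped at k.
lemma pvAgree (ds : List (List Char)) (s : List Char) :
    ∀ (k : Nat), pvSeqFound ds s k = true →
    ∃ bs, pvBounds ds s (k : Int) = some bs ∧
          pvCut s (k : Int) bs = pvDivA ds (s.drop k) := by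
  induction ds with
  | nil =>
    intro k _
    refine ⟨[], rfl, ?_⟩
    simp [pvCut, pvDivA, PySem.List.slice_from_natCast]
  | cons d ds ih =>
    intro k hok
    by_cases hk : k ≤ s.length
    · -- within the text: findFrom k = k + relative find
      have hbridge := PySem.Chars.findFrom_natCast s d k hk
      simp only [pvSeqFound] at hok
      by_cases hmiss : PySem.Chars.find (s.drop k) d = -1
      · rw [hbridge, if_pos hmiss] at hok; simp at hok
      · have hpos : PySem.Chars.findFrom s d (k : Int) none
            = (k : Int) + PySem.Chars.find (s.drop k) d := by
          rw [hbridge, if_neg hmiss]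
        have hr0 : 0 ≤ PySem.Chars.find (s.drop k) d := by
          have := PySem.Chars.neg_one_le_find (s.drop k) d
          omega
        set r : Nat := (PySem.Chars.find (s.drop k) d).toNat with hrdef
        have hrv : PySem.Chars.find (s.drop k) d = (r : Int) := by
          simp [hrdef, Int.toNat_of_nonneg hr0]
        have hpne : PySem.Chars.findFrom s d (k : Int) none ≠ -1 := by
          rw [hpos]; omega
        rw [if_neg hpne] at hok
        have htn : (PySem.Chars.findFrom s d (k : Int) none).toNat + 1 = k + r + 1 := by
          rw [hpos, hrv]; omega
        rw [htn] at hok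
        obtain ⟨bs, hb, hc⟩ := ih (k + r + 1) hok
        refine ⟨((k : Int) + r) :: bs, ?_, ?_⟩
        · simp only [pvBounds]
          rw [hpos, hrv, if_neg (by omega : ¬ ((k : Int) + (r : Int) = -1))]
          have : (k : Int) + (r : Int) + 1 = ((k + r + 1 : Nat) : Int) := by push_cast; ring
          rw [this, hb]; rfl
        · simp only [pvCut, pvDivA]
          rw [if_neg (by rw [hrv]; omega : ¬ PySem.Chars.find (s.drop k) d = -1)]
          congr 1
          · -- piece: s[k : k+r] = (s.drop k)[:r]
            rw [hrv, PySem.List.slice_natCast_add,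
              PySem.List.slice_to (List.drop k s) (by omega : (0:Int) ≤ ((r : Nat) : Int))]
            simp
          · -- rest: continue at k+r+1 = drop (r+1) of the dropped text
            have h1 : (k : Int) + (r : Int) + 1 = ((k + r + 1 : Nat) : Int) := by push_cast; ring
            rw [h1, hc, hrv]
            have h2 : PySem.List.slice (s.drop k) (some ((r : Int) + 1)) none
                = (s.drop k).drop (r + 1) := by
              have : ((r : Int) + 1) = ((r + 1 : Nat) : Int) := by push_cast; ring
              rw [this, PySem.List.slice_from_natCast]
            rw [h2, List.drop_drop, show k + (r + 1) = k + r + 1 from by omega]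
    · -- start past the end: the chain cannot succeed
      simp only [pvSeqFound] at hok
      rw [pvFindFrom_past s d k (by omega)] at hok
      simp at hok

-- ===== VERDICT (by name: the statement is the Claim_ definition above) =====
theorem divide_html_spec : Claim_equal_divide_html := by
  intro achar str _ hpre
  unfold Spec_divide_html divide_html divide_html_alt
  obtain ⟨bs, hb, hc⟩ := pvAgree (achar.map String.toList) (PySem.Chars.strip str.toList) 0 hpre
  simp only [Int.natCast_zero] at hb hc
  rw [hb]
  simp only [List.drop_zero] at hc
  exact congrArg (List.map String.ofList) hc.symm
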